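-- pv_equiv track=rewrite | github.com/jakjank/KursyUWr_UP | Sztuczna Inteligencja/Lista1/zad1.py | pos_covered_by_king
-- ===== SOURCE A (Python) =====
-- def pos_covered_by_king(px,py,wk):
--     for dx in [-1,0,1]:
--         for dy in [-1,0,1]:
--             nx = px + dx
--             ny = py + dy
--             if nx == wk[0] and ny == wk[1]:
--                 return True
--     return False
-- ===== SOURCE B (Python) =====
-- def pos_covered_by_king(px, py, wk):
--     return abs(px - wk[0]) <= 1 and abs(py - wk[1]) <= 1
-- ===== Notes on version B (the rewrite author's own statement) =====
-- stated objective: simpler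
-- what changed: Replaces the nested loop over the nine neighbour offsets with a single closed-form Chebyshev-distance test on the coordinate differences.
import Mathlib
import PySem

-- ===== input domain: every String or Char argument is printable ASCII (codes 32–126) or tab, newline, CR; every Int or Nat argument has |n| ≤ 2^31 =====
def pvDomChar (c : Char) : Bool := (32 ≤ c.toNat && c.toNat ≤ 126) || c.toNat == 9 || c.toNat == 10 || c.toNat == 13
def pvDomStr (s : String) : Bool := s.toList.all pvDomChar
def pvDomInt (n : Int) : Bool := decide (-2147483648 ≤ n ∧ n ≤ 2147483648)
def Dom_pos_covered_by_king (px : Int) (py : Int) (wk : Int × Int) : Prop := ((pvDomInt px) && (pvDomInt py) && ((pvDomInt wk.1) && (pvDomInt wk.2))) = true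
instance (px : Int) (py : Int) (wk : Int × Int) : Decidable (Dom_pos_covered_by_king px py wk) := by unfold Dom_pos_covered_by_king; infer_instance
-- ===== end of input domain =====

-- B replaces A's nested loop over the nine offsets by one closed-form Chebyshev-distance test (simpler).
-- ===== PORT A =====
-- A: nested for-loops over dx, dy in [-1,0,1]; early return True on a match = List.any over the same lists.
def pos_covered_by_king (px : Int) (py : Int) (wk : Int × Int) : Bool :=
  ([(-1 : Int), 0, 1]).any (fun dx =>
    ([(-1 : Int), 0, 1]).any (fun dy =>
      px + dx == wk.1 && py + dy == wk.2))

-- ===== PORT B =====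
def pos_covered_by_king_alt (px : Int) (py : Int) (wk : Int × Int) : Bool :=
  ((px - wk.1).natAbs ≤ 1 && (py - wk.2).natAbs ≤ 1)

-- ===== PRECONDITION & SPEC =====
def Spec_pos_covered_by_king (px : Int) (py : Int) (wk : Int × Int) (out : Bool) : Prop := out = pos_covered_by_king_alt px py wk
instance (px : Int) (py : Int) (wk : Int × Int) (out : Bool) : Decidable (Spec_pos_covered_by_king px py wk out) := by unfold Spec_pos_covered_by_king; infer_instance

-- ===== CLAIM (what is proved, stated in full; the proofs are below) =====
def Claim_equal_pos_covered_by_king : Prop := ∀ (px : Int) (py : Int) (wk : Int × Int), Dom_pos_covered_by_king px py wk → Spec_pos_covered_by_king px py wk (pos_covered_by_king px py wk)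

-- ===== LEMMAS AND PROOFS =====

-- ===== VERDICT (by name: the statement is the Claim_ definition above) =====
theorem pos_covered_by_king_spec : Claim_equal_pos_covered_by_king := by
  intro px py wk _
  unfold Spec_pos_covered_by_king pos_covered_by_king pos_covered_by_king_alt
  simp only [List.any_cons, List.any_nil, Bool.or_false]
  rw [Bool.eq_iff_iff]
  simp only [Bool.or_eq_true, Bool.and_eq_true, beq_iff_eq, decide_eq_true_eq]
  omega
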